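-- pv_equiv track=rewrite | github.com/kevinhyj/PhaseFlow | sliding_window_scoring/compute_idr_stats.py | get_non_idr_window_positions
-- ===== SOURCE A (Python) =====
-- WINDOW_SIZE = 10
--
-- def get_non_idr_window_positions(idr_regions, n_windows):
--     non_idr_windows = set()
--     for pos in range(1, n_windows + 1):
--         window_start = pos
--         window_end = pos + WINDOW_SIZE - 1
--         overlaps = False
--         for idr_start, idr_end in idr_regions:
--             if not (window_end < idr_start or idr_end < window_start):
--                 overlaps = True
--                 break
--         if not overlaps:
--             non_idr_windows.add(pos)
--     return non_idr_windows
-- ===== SOURCE B (Python) =====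
-- WINDOW_SIZE = 10
--
-- def get_non_idr_window_positions(idr_regions, n_windows):
--     # Difference-array sweep: each region blocks positions [start-WINDOW_SIZE+1, end];
--     # record +1/-1 deltas once, then one prefix-sum pass over the positions.
--     delta = {}
--     for idr_start, idr_end in idr_regions:
--         lo = max(1, idr_start - WINDOW_SIZE + 1)
--         hi = min(n_windows, idr_end)
--         if lo <= hi:
--             delta[lo] = delta.get(lo, 0) + 1
--             delta[hi + 1] = delta.get(hi + 1, 0) - 1
--     non_idr_windows = set()
--     cnt = 0
--     for pos in range(1, n_windows + 1):
--         cnt += delta.get(pos, 0)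
--         if cnt == 0:
--             non_idr_windows.add(pos)
--     return non_idr_windows
-- ===== Notes on version B (the rewrite author's own statement) =====
-- stated objective: faster
-- what changed: Replaced the per-position scan over all IDR regions by a difference-array sweep: each region contributes +1/-1 deltas at the ends of its blocked-position interval, then a single prefix-sum pass over the positions collects those with zero count.
import Mathlib
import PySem

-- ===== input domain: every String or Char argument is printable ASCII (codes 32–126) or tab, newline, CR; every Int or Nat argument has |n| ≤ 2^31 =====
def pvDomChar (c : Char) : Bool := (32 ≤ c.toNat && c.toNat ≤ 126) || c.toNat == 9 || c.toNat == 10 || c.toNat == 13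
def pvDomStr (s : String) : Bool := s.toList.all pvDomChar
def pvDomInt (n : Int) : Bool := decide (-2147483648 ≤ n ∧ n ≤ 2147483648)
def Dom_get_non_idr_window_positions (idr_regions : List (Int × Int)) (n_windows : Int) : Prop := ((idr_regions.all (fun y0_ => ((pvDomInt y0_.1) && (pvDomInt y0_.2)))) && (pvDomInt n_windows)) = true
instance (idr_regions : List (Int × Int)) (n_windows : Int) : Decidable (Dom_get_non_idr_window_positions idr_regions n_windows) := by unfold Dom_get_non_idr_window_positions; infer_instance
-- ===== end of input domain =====

-- B replaces the per-position scan over all regions by a difference-array sweep: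
-- each region contributes two deltas, then one prefix-sum pass over the positions (objective: faster).

-- ===== PORT A =====
-- the inner 'for idr_start, idr_end in idr_regions: … break' loop of A
def pvOverlapsLoop (idr_regions : List (Int × Int)) (window_start window_end : Int) : Bool :=
  match idr_regions with
  | [] => false
  | (idr_start, idr_end) :: rest =>
    if ¬(window_end < idr_start ∨ idr_end < window_start) then true
    else pvOverlapsLoop rest window_start window_end

def get_non_idr_window_positions (idr_regions : List (Int × Int)) (n_windows : Int) : List Int :=
  (PySem.List.pyRange 1 (n_windows + 1) 1).foldl
    (fun non_idr_windows pos =>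
      let window_start := pos
      let window_end := pos + 10 - 1
      if pvOverlapsLoop idr_regions window_start window_end then non_idr_windows
      else PySem.Set.add non_idr_windows pos)
    PySem.Set.empty

-- ===== PORT B =====
def get_non_idr_window_positions_alt (idr_regions : List (Int × Int)) (n_windows : Int) : List Int :=
  let delta : PySem.Dict Int Int := idr_regions.foldl
    (fun d r =>
      let lo := max 1 (r.1 - 10 + 1)
      let hi := min n_windows r.2
      if lo ≤ hi then
        let d1 := d.insert lo (d.getD lo 0 + 1)
        d1.insert (hi + 1) (d1.getD (hi + 1) 0 - 1)
      else d)
    PySem.Dict.empty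
  ((PySem.List.pyRange 1 (n_windows + 1) 1).foldl
    (fun st pos =>
      let cnt := st.2 + delta.getD pos 0
      (if cnt == 0 then PySem.Set.add st.1 pos else st.1, cnt))
    ((PySem.Set.empty : PySem.Set Int), (0 : Int))).1

-- ===== PRECONDITION & SPEC =====
def Spec_get_non_idr_window_positions (idr_regions : List (Int × Int)) (n_windows : Int) (out : List Int) : Prop := out = get_non_idr_window_positions_alt idr_regions n_windows
instance (idr_regions : List (Int × Int)) (n_windows : Int) (out : List Int) : Decidable (Spec_get_non_idr_window_positions idr_regions n_windows out) := by unfold Spec_get_non_idr_window_positions; infer_instance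

-- ===== CLAIM (what is proved, stated in full; the proofs are below) =====
def Claim_equal_get_non_idr_window_positions : Prop := ∀ (idr_regions : List (Int × Int)) (n_windows : Int), Dom_get_non_idr_window_positions idr_regions n_windows → Spec_get_non_idr_window_positions idr_regions n_windows (get_non_idr_window_positions idr_regions n_windows)

-- ===== LEMMAS AND PROOFS =====

-- prefix sum of the dict's values over positions 1..p
def pvS (d : PySem.Dict Int Int) (p : Int) : Int :=
  ((PySem.List.pyRange 1 (p + 1) 1).map (fun q => d.getD q 0)).sum

theorem pvOverlapsLoop_iff (l : List (Int × Int)) (ws we : Int) :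
    pvOverlapsLoop l ws we = true ↔ ∃ r ∈ l, r.1 ≤ we ∧ ws ≤ r.2 := by
  induction l with
  | nil => simp [pvOverlapsLoop]
  | cons r rest ih =>
    obtain ⟨s, e⟩ := r
    simp only [pvOverlapsLoop]
    by_cases h : ¬(we < s ∨ e < ws) <;> simp [h, ih] <;> omega

theorem pvSum_ite_mem (l : List Int) (k v : Int) (hl : l.Nodup) :
    (l.map (fun q => if q = k then v else 0)).sum = if k ∈ l then v else 0 := by
  induction l with
  | nil => simp
  | cons x xs ih =>
    simp only [List.nodup_cons] at hl
    by_cases hx : x = k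
    · subst hx; simp [hl.1, ih hl.2]
    · simp [hx, ih hl.2, Ne.symm hx]

theorem pvS_insert (d : PySem.Dict Int Int) (k v p : Int) :
    pvS (d.insert k (d.getD k 0 + v)) p = pvS d p + (if 1 ≤ k ∧ k ≤ p then v else 0) := by
  unfold pvS
  have h1 : ∀ q : Int, (d.insert k (d.getD k 0 + v)).getD q 0
      = d.getD q 0 + (if q = k then v else 0) := by
    intro q
    rw [PySem.Dict.getD_insert]
    by_cases hq : q = k <;> simp [hq]
  simp only [h1]
  rw [PySem.List.sum_map_add_int]
  rw [pvSum_ite_mem _ _ _ (PySem.List.nodup_pyRange_one 1 (p+1))]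
  simp [PySem.List.mem_pyRange_one]

-- one region's contribution to the prefix sum
theorem pvS_region (n p : Int) (d : PySem.Dict Int Int) (r : Int × Int) :
    pvS (if max 1 (r.1 - 10 + 1) ≤ min n r.2 then
          (d.insert (max 1 (r.1 - 10 + 1)) (d.getD (max 1 (r.1 - 10 + 1)) 0 + 1)).insert
            (min n r.2 + 1)
            ((d.insert (max 1 (r.1 - 10 + 1)) (d.getD (max 1 (r.1 - 10 + 1)) 0 + 1)).getD (min n r.2 + 1) 0 - 1)
         else d) p
    = pvS d p + (if max 1 (r.1 - 10 + 1) ≤ p ∧ p ≤ min n r.2 then 1 else 0) := by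
  by_cases hle : max 1 (r.1 - 10 + 1) ≤ min n r.2
  · simp only [hle, if_true]
    rw [show ∀ (d' : PySem.Dict Int Int) (k : Int), d'.insert k (d'.getD k 0 - 1) = d'.insert k (d'.getD k 0 + (-1)) from fun d' k => by rw [sub_eq_add_neg]]
    rw [pvS_insert, pvS_insert]
    split_ifs <;> omega
  · rw [if_neg hle]
    have h2 : ¬(max 1 (r.1 - 10 + 1) ≤ p ∧ p ≤ min n r.2) := by omega
    rw [if_neg h2, add_zero]

-- the delta dictionary's prefix sum counts the regions blocking position p
theorem pvS_delta (idr_regions : List (Int × Int)) (n p : Int) (d0 : PySem.Dict Int Int) :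
    pvS (idr_regions.foldl
      (fun d r =>
        if max 1 (r.1 - 10 + 1) ≤ min n r.2 then
          (d.insert (max 1 (r.1 - 10 + 1)) (d.getD (max 1 (r.1 - 10 + 1)) 0 + 1)).insert
            (min n r.2 + 1)
            ((d.insert (max 1 (r.1 - 10 + 1)) (d.getD (max 1 (r.1 - 10 + 1)) 0 + 1)).getD (min n r.2 + 1) 0 - 1)
        else d) d0) p
    = pvS d0 p
      + ((idr_regions.map (fun r => if max 1 (r.1 - 10 + 1) ≤ p ∧ p ≤ min n r.2 then (1 : Int) else 0)).sum) := by
  induction idr_regions generalizing d0 with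
  | nil => simp
  | cons r rest ih =>
    simp only [List.foldl_cons, List.map_cons, List.sum_cons]
    rw [ih, pvS_region n p d0 r]
    ring

theorem pvS_zero_iff (idr_regions : List (Int × Int)) (n p : Int) (hp : 1 ≤ p) (hpn : p ≤ n) :
    (pvS (idr_regions.foldl
      (fun d r =>
        if max 1 (r.1 - 10 + 1) ≤ min n r.2 then
          (d.insert (max 1 (r.1 - 10 + 1)) (d.getD (max 1 (r.1 - 10 + 1)) 0 + 1)).insert
            (min n r.2 + 1)
            ((d.insert (max 1 (r.1 - 10 + 1)) (d.getD (max 1 (r.1 - 10 + 1)) 0 + 1)).getD (min n r.2 + 1) 0 - 1)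
        else d) PySem.Dict.empty) p = 0)
    ↔ ¬ ∃ r ∈ idr_regions, r.1 ≤ p + 10 - 1 ∧ p ≤ r.2 := by
  rw [pvS_delta idr_regions n p]
  have h0 : pvS PySem.Dict.empty p = 0 := by
    unfold pvS; simp [PySem.Dict.getD_empty]
  rw [h0, zero_add]
  rw [show (fun r : Int × Int => if max 1 (r.1 - 10 + 1) ≤ p ∧ p ≤ min n r.2 then (1 : Int) else 0)
        = (fun r : Int × Int => if (fun r : Int × Int => decide (max 1 (r.1 - 10 + 1) ≤ p ∧ p ≤ min n r.2)) r = true then (1 : Int) else 0)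
      from by funext r; simp]
  rw [PySem.List.sum_map_ite_one_zero]
  rw [Int.natCast_eq_zero, List.countP_eq_zero]
  constructor
  · intro h ⟨r, hr, h1, h2⟩
    have := h r hr
    simp only [decide_eq_true_eq] at this
    omega
  · intro h r hr
    simp only [decide_eq_true_eq]
    intro hc
    exact h ⟨r, hr, by omega⟩

-- A's fold appends exactly the non-overlapping positions, in range order
theorem pvA_fold (idr_regions : List (Int × Int)) (a b : Int) (acc : List Int) (hacc : ∀ x ∈ acc, x < a) :
    (PySem.List.pyRange a b 1).foldl
      (fun s pos => if pvOverlapsLoop idr_regions pos (pos + 10 - 1) then s else PySem.Set.add s pos) acc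
    = acc ++ (PySem.List.pyRange a b 1).filter (fun pos => !pvOverlapsLoop idr_regions pos (pos + 10 - 1)) := by
  by_cases hab : b ≤ a
  · simp [PySem.List.pyRange_one_eq_nil hab]
  · rw [Int.not_le] at hab
    rw [PySem.List.pyRange_one_cons hab]
    simp only [List.foldl_cons, List.filter_cons]
    by_cases hP : pvOverlapsLoop idr_regions a (a + 10 - 1)
    · rw [if_pos hP, if_neg (by simp [hP])]
      exact pvA_fold idr_regions (a+1) b acc (fun x hx => by have := hacc x hx; omega)
    · have hnotin : a ∉ acc := fun hm => absurd (hacc a hm) (by omega)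
      have hmem : PySem.Set.add acc a = acc ++ [a] := by
        simp [PySem.Set.add, PySem.Set.contains, hnotin]
      rw [if_neg hP, if_pos (by simp [hP]), hmem]
      rw [pvA_fold idr_regions (a+1) b (acc ++ [a])
        (fun x hx => by rcases List.mem_append.1 hx with h | h
                        · have := hacc x h; omega
                        · simp at h; omega)]
      simp
termination_by (b - a).toNat
decreasing_by all_goals omega

-- B's fold appends exactly the positions with zero prefix sum, in range order
theorem pvB_fold (d : PySem.Dict Int Int) (S : Int → Int)
    (hS : ∀ p, 1 ≤ p → S p = S (p - 1) + d.getD p 0)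
    (a b : Int) (acc : List Int) (c : Int) (ha : 1 ≤ a) (hc : c = S (a - 1))
    (hacc : ∀ x ∈ acc, x < a) :
    ((PySem.List.pyRange a b 1).foldl
      (fun st pos =>
        (if st.2 + d.getD pos 0 == 0 then PySem.Set.add st.1 pos else st.1, st.2 + d.getD pos 0)) (acc, c)).1
    = acc ++ (PySem.List.pyRange a b 1).filter (fun pos => S pos == 0) := by
  by_cases hab : b ≤ a
  · simp [PySem.List.pyRange_one_eq_nil hab]
  · rw [Int.not_le] at hab
    have hterm : ((b - (a+1)).toNat) < ((b - a).toNat) := by omega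
    rw [PySem.List.pyRange_one_cons hab]
    simp only [List.foldl_cons, List.filter_cons]
    have hcnt : c + d.getD a 0 = S a := by rw [hS a ha, hc]
    by_cases hz : S a = 0
    · have hnotin : a ∉ acc := fun hm => absurd (hacc a hm) (by omega)
      have hmem : PySem.Set.add acc a = acc ++ [a] := by
        simp [PySem.Set.add, PySem.Set.contains, hnotin]
      rw [if_pos (show (c + d.getD a 0 == 0) = true by simp [hcnt, hz]),
          if_pos (show ((S a == 0) : Bool) = true by simp [hz]), hmem]
      rw [pvB_fold d S hS (a+1) b (acc ++ [a]) (c + d.getD a 0) (by omega)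
        (by rw [hcnt]; ring_nf)
        (fun x hx => by rcases List.mem_append.1 hx with h | h
                        · have := hacc x h; omega
                        · simp at h; omega)]
      simp
    · rw [if_neg (show ¬((c + d.getD a 0 == 0) = true) by simp [hcnt, hz]),
          if_neg (show ¬(((S a == 0) : Bool) = true) by simp [hz])]
      exact pvB_fold d S hS (a+1) b acc (c + d.getD a 0) (by omega)
        (by rw [hcnt]; ring_nf)
        (fun x hx => by have := hacc x hx; omega)
termination_by (b - a).toNat
decreasing_by all_goals omega

theorem pvS_step (d : PySem.Dict Int Int) (p : Int) (hp : 1 ≤ p) :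
    pvS d p = pvS d (p - 1) + d.getD p 0 := by
  unfold pvS
  rw [show p + 1 = (p - 1 + 1) + 1 by ring, PySem.List.pyRange_one_succ_right (by omega)]
  simp

-- ===== VERDICT (by name: the statement is the Claim_ definition above) =====
theorem get_non_idr_window_positions_spec : Claim_equal_get_non_idr_window_positions := by
  intro idr_regions n_windows _
  unfold Spec_get_non_idr_window_positions
  simp only [get_non_idr_window_positions, get_non_idr_window_positions_alt]
  set delta : PySem.Dict Int Int := idr_regions.foldl
    (fun d r =>
      if max 1 (r.1 - 10 + 1) ≤ min n_windows r.2 then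
        (d.insert (max 1 (r.1 - 10 + 1)) (d.getD (max 1 (r.1 - 10 + 1)) 0 + 1)).insert
          (min n_windows r.2 + 1)
          ((d.insert (max 1 (r.1 - 10 + 1)) (d.getD (max 1 (r.1 - 10 + 1)) 0 + 1)).getD (min n_windows r.2 + 1) 0 - 1)
      else d) PySem.Dict.empty with hdelta
  rw [pvA_fold idr_regions 1 (n_windows + 1) PySem.Set.empty
      (by intro x hx; simp [PySem.Set.empty] at hx)]
  rw [pvB_fold delta (pvS delta) (fun p hp => pvS_step delta p hp) 1 (n_windows + 1)
      PySem.Set.empty 0 (by omega)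
      (by unfold pvS; simp [PySem.List.pyRange_one_eq_nil])
      (by intro x hx; simp [PySem.Set.empty] at hx)]
  simp only [PySem.Set.empty, List.nil_append]
  apply List.filter_congr
  intro pos hpos
  rw [PySem.List.mem_pyRange_one] at hpos
  have hiff := pvS_zero_iff idr_regions n_windows pos (by omega) (by omega)
  rw [← hdelta] at hiff
  have hov := pvOverlapsLoop_iff idr_regions pos (pos + 10 - 1)
  by_cases h : pvOverlapsLoop idr_regions pos (pos + 10 - 1)
  · have hne : ¬ pvS delta pos = 0 := by
      rw [hiff]; intro hno; exact hno (hov.1 h)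
    simp [h, hne]
  · have heq : pvS delta pos = 0 := by
      rw [hiff]; intro hex; exact h (hov.2 hex)
    simp [h, heq]
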